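-- pv_equiv track=rewrite | github.com/DanyalFaheem/Artificial-Intelligence | Assignment1/i192014_F.py | isUpperorLower
-- ===== SOURCE A (Python) =====
-- def isUpperorLower(mat):
--     check = True
--     # Traversing the Upper triangular Matrix to make sure no value is 0
--     for i in range(len(mat)):
--         for j in range(i + 1, len(mat)):
--             if j < len(mat):
--                 if mat[i][j] != 0:
--                     check = False
--                     break
--     if check == True:
--         return "Lower Triangular Matrix"
--     check = True
--         # Traversing the Lower triangular Matrix to make sure no value is 0
--     for i in range(1, len(mat)):
--         for j in range(i):
--             if j < len(mat):
--                 if mat[i][j] != 0: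
--                     check = False
--                     break
--     if check == True:
--         return "Upper Triangular Matrix"
--     # If not a triangular matrix
--     return "Not a Triangular Matrix"
-- ===== SOURCE B (Python) =====
-- def isUpperorLower(mat):
--     # One pass over the leading len(mat)-column block, maintaining two flags.
--     n = len(mat)
--     upper = False
--     lower = False
--     for i, row in enumerate(mat):
--         for j, x in enumerate(row[:n]):
--             if x != 0:
--                 if j > i:
--                     upper = True
--                 elif j < i:
--                     lower = True
--     if not upper:
--         return "Lower Triangular Matrix"
--     if not lower:
--         return "Upper Triangular Matrix"
--     return "Not a Triangular Matrix"
-- ===== Notes on version B (the rewrite author's own statement) =====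
-- stated objective: simpler
-- what changed: Replaces A's two separate nested index-based scans (with break and an early return between them) by a single enumerate pass over the leading len(mat)-column block that maintains two boolean flags (nonzero strictly above / strictly below the diagonal) and classifies once at the end.
import Mathlib
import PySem

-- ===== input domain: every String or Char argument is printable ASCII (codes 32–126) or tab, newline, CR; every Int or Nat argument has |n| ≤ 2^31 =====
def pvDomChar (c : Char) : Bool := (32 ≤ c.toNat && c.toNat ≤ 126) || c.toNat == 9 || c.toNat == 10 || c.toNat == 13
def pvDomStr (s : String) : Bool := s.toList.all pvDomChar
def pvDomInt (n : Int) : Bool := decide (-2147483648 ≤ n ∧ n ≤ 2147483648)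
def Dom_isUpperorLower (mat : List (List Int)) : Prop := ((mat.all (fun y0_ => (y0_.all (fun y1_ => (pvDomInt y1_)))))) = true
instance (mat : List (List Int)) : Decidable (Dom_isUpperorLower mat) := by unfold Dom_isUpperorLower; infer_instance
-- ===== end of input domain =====

-- B replaces A's two separate nested index scans by one enumerate pass keeping two flags; same cost, simpler shape.


-- ===== PORT A =====
-- inner loop 'for j in js: if j < n: if mat[i][j] != 0: check = False; break'
-- (mat[i][j] is in range for every input admitted by Pre_; out of range Python raises IndexError)
def pvInner (row : List Int) (n : Int) (js : List Int) (check : Bool) : Bool :=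
  match js with
  | [] => check
  | j :: rest =>
    if j < n then
      if PySem.List.pyGetD row j 0 ≠ 0 then false
      else pvInner row n rest check
    else pvInner row n rest check

-- first outer loop: for i in range(len(mat)): inner over range(i+1, len(mat))
def pvOuterUp (mat : List (List Int)) (n : Int) (is_ : List Int) (check : Bool) : Bool :=
  match is_ with
  | [] => check
  | i :: rest =>
      pvOuterUp mat n rest
        (pvInner (PySem.List.pyGetD mat i []) n (PySem.List.pyRange (i + 1) n 1) check)

-- second outer loop: for i in range(1, len(mat)): inner over range(i)
def pvOuterLo (mat : List (List Int)) (n : Int) (is_ : List Int) (check : Bool) : Bool :=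
  match is_ with
  | [] => check
  | i :: rest =>
      pvOuterLo mat n rest
        (pvInner (PySem.List.pyGetD mat i []) n (PySem.List.pyRange 0 i 1) check)

def isUpperorLower (mat : List (List Int)) : String :=
  let n : Int := mat.length
  let check := pvOuterUp mat n (PySem.List.pyRange 0 n 1) true
  if check then "Lower Triangular Matrix"
  else
    let check2 := pvOuterLo mat n (PySem.List.pyRange 1 n 1) true
    if check2 then "Upper Triangular Matrix"
    else "Not a Triangular Matrix"

-- ===== PORT B =====
-- inner loop of Source B: for j, x in enumerate(row[:n]): update the two flags
def pvScanRow (i : Int) (pairs : List (Int × Int)) (upper lower : Bool) : Bool × Bool :=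
  match pairs with
  | [] => (upper, lower)
  | (j, x) :: rest =>
    if x ≠ 0 then
      if j > i then pvScanRow i rest true lower
      else if j < i then pvScanRow i rest upper true
      else pvScanRow i rest upper lower
    else pvScanRow i rest upper lower

-- outer loop of Source B: for i, row in enumerate(mat)
def pvScan (n : Int) (pairs : List (Int × List Int)) (upper lower : Bool) : Bool × Bool :=
  match pairs with
  | [] => (upper, lower)
  | (i, row) :: rest =>
    let p := pvScanRow i (PySem.List.enumerate (PySem.List.slice row none (some n)) 0) upper lower
    pvScan n rest p.1 p.2

def isUpperorLower_alt (mat : List (List Int)) : String :=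
  let n : Int := mat.length
  let p := pvScan n (PySem.List.enumerate mat 0) false false
  if !p.1 then "Lower Triangular Matrix"
  else if !p.2 then "Upper Triangular Matrix"
  else "Not a Triangular Matrix"

-- ===== PRECONDITION & SPEC =====
-- Pre_ excludes ragged matrices with a row shorter than the indices A's scans reach (row i needs
-- len(mat) columns, the last row len(mat)-1): there the Python A may raise IndexError; on the excluded
-- inputs where an early break lets A return anyway, B returns the same value (see cite).
def Pre_isUpperorLower (mat : List (List Int)) : Prop :=
  ∀ i : Nat, i < mat.length →
    (if i + 1 = mat.length then mat.length - 1 else mat.length) ≤ (mat.getD i []).length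
instance (mat : List (List Int)) : Decidable (Pre_isUpperorLower mat) := by
  unfold Pre_isUpperorLower; infer_instance
def pvWitness_isUpperorLower : List (List Int) := [[1, 0], [2, 3]]
def Spec_isUpperorLower (mat : List (List Int)) (out : String) : Prop := out = isUpperorLower_alt mat
instance (mat : List (List Int)) (out : String) : Decidable (Spec_isUpperorLower mat out) := by unfold Spec_isUpperorLower; infer_instance

-- ===== CLAIM (what is proved, stated in full; the proofs are below) =====
def Claim_equal_isUpperorLower : Prop := ∀ (mat : List (List Int)), Dom_isUpperorLower mat → Pre_isUpperorLower mat → Spec_isUpperorLower mat (isUpperorLower mat)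

-- ===== LEMMAS AND PROOFS =====

-- 'there is a nonzero strictly above the diagonal inside the leading n-column block'
def Uprop (mat : List (List Int)) : Prop :=
  ∃ i j : Nat, i < mat.length ∧ j < mat.length ∧ i < j ∧ (mat.getD i []).getD j 0 ≠ 0

-- 'there is a nonzero strictly below the diagonal'
def Lprop (mat : List (List Int)) : Prop :=
  ∃ i j : Nat, i < mat.length ∧ j < i ∧ (mat.getD i []).getD j 0 ≠ 0

lemma pvInner_eq (row : List Int) (n : Int) (js : List Int) (check : Bool) :
    pvInner row n js check =
      (check && !js.any (fun j => decide (j < n) && decide (PySem.List.pyGetD row j 0 ≠ 0))) := by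
  induction js with
  | nil => simp [pvInner]
  | cons j rest ih =>
    simp only [pvInner, List.any_cons]
    by_cases hj : j < n
    · by_cases hx : PySem.List.pyGetD row j 0 ≠ 0
      · simp [hj, hx]
      · simp [hj, hx, ih]
    · simp [hj, ih]

lemma pvOuterUp_eq (mat : List (List Int)) (n : Int) (is_ : List Int) (check : Bool) :
    pvOuterUp mat n is_ check =
      (check && is_.all (fun i =>
        !(PySem.List.pyRange (i + 1) n 1).any (fun j =>
            decide (j < n) && decide (PySem.List.pyGetD (PySem.List.pyGetD mat i []) j 0 ≠ 0)))) := by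
  induction is_ generalizing check with
  | nil => simp [pvOuterUp]
  | cons i rest ih =>
    simp only [pvOuterUp, List.all_cons, ih, pvInner_eq]
    cases check <;> simp

lemma pvOuterLo_eq (mat : List (List Int)) (n : Int) (is_ : List Int) (check : Bool) :
    pvOuterLo mat n is_ check =
      (check && is_.all (fun i =>
        !(PySem.List.pyRange 0 i 1).any (fun j =>
            decide (j < n) && decide (PySem.List.pyGetD (PySem.List.pyGetD mat i []) j 0 ≠ 0)))) := by
  induction is_ generalizing check with
  | nil => simp [pvOuterLo]
  | cons i rest ih =>
    simp only [pvOuterLo, List.all_cons, ih, pvInner_eq]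
    cases check <;> simp

lemma phaseUp_iff (mat : List (List Int)) :
    pvOuterUp mat (mat.length : Int) (PySem.List.pyRange 0 (mat.length : Int) 1) true = true
      ↔ ¬ Uprop mat := by
  rw [pvOuterUp_eq, Bool.true_and, List.all_eq_true]
  unfold Uprop
  constructor
  · rintro h ⟨i, j, hi, hj, hij, hx⟩
    have hmem : (i : Int) ∈ PySem.List.pyRange 0 (mat.length : Int) 1 :=
      PySem.List.mem_pyRange_one.mpr ⟨by positivity, by exact_mod_cast hi⟩
    have h2 := h _ hmem
    rw [Bool.not_eq_true', List.any_eq_false] at h2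
    have hjm : (j : Int) ∈ PySem.List.pyRange ((i : Int) + 1) (mat.length : Int) 1 :=
      PySem.List.mem_pyRange_one.mpr ⟨by omega, by exact_mod_cast hj⟩
    have h3 := h2 _ hjm
    simp only [Bool.and_eq_true, decide_eq_true_eq, PySem.List.pyGetD_natCast] at h3
    exact h3 ⟨by exact_mod_cast hj, hx⟩
  · intro h i hi
    rw [Bool.not_eq_true', List.any_eq_false]
    intro j hj
    simp only [Bool.and_eq_true, decide_eq_true_eq, not_and]
    intro hjn hx
    rw [PySem.List.mem_pyRange_one] at hi hj
    rw [PySem.List.pyGetD_of_nonneg mat [] (by omega),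
        PySem.List.pyGetD_of_nonneg _ 0 (by omega)] at hx
    exact h ⟨i.toNat, j.toNat, by omega, by omega, by omega, hx⟩

lemma phaseLo_iff (mat : List (List Int)) :
    pvOuterLo mat (mat.length : Int) (PySem.List.pyRange 1 (mat.length : Int) 1) true = true
      ↔ ¬ Lprop mat := by
  rw [pvOuterLo_eq, Bool.true_and, List.all_eq_true]
  unfold Lprop
  constructor
  · rintro h ⟨i, j, hi, hj, hx⟩
    have hmem : (i : Int) ∈ PySem.List.pyRange 1 (mat.length : Int) 1 :=
      PySem.List.mem_pyRange_one.mpr ⟨by omega, by exact_mod_cast hi⟩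
    have h2 := h _ hmem
    rw [Bool.not_eq_true', List.any_eq_false] at h2
    have hjm : (j : Int) ∈ PySem.List.pyRange 0 (i : Int) 1 :=
      PySem.List.mem_pyRange_one.mpr ⟨by positivity, by exact_mod_cast hj⟩
    have h3 := h2 _ hjm
    simp only [Bool.and_eq_true, decide_eq_true_eq, PySem.List.pyGetD_natCast] at h3
    exact h3 ⟨by omega, hx⟩
  · intro h i hi
    rw [Bool.not_eq_true', List.any_eq_false]
    intro j hj
    simp only [Bool.and_eq_true, decide_eq_true_eq, not_and]
    intro hjn hx
    rw [PySem.List.mem_pyRange_one] at hi hj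
    rw [PySem.List.pyGetD_of_nonneg mat [] (by omega),
        PySem.List.pyGetD_of_nonneg _ 0 (by omega)] at hx
    exact h ⟨i.toNat, j.toNat, by omega, by omega, hx⟩

lemma pvScanRow_eq (i : Int) (pairs : List (Int × Int)) (u l : Bool) :
    pvScanRow i pairs u l =
      ((u || pairs.any (fun p => decide (p.2 ≠ 0) && decide (p.1 > i))),
       (l || pairs.any (fun p => decide (p.2 ≠ 0) && decide (p.1 < i)))) := by
  induction pairs generalizing u l with
  | nil => simp [pvScanRow]
  | cons p rest ih =>
    obtain ⟨j, x⟩ := p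
    simp only [pvScanRow]
    by_cases hx : x ≠ 0
    · by_cases hj : j > i
      · have : ¬ j < i := by omega
        simp [hx, hj, this, ih]
      · by_cases hj' : j < i
        · simp [hx, hj, hj', ih]
        · simp [hx, hj, hj', ih]
    · have hx0 : x = 0 := by omega
      simp [hx0, ih]

lemma pvScan_eq (n : Int) (pairs : List (Int × List Int)) (u l : Bool) :
    pvScan n pairs u l =
      ((u || pairs.any (fun p =>
          (PySem.List.enumerate (PySem.List.slice p.2 none (some n)) 0).any
            (fun q => decide (q.2 ≠ 0) && decide (q.1 > p.1)))),
       (l || pairs.any (fun p =>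
          (PySem.List.enumerate (PySem.List.slice p.2 none (some n)) 0).any
            (fun q => decide (q.2 ≠ 0) && decide (q.1 < p.1))))) := by
  induction pairs generalizing u l with
  | nil => simp [pvScan]
  | cons p rest ih =>
    simp only [pvScan, pvScanRow_eq, ih]
    simp [Bool.or_assoc]

-- any over enumerate, as an existential over positions
lemma enumerate_any_iff {α : Type} (d : α) (f : Int × α → Bool) (xs : List α) (s : Int) :
    ((PySem.List.enumerate xs s).any f = true)
      ↔ ∃ k : Nat, k < xs.length ∧ f (s + k, xs.getD k d) = true := by
  induction xs generalizing s with
  | nil => simp [PySem.List.enumerate_nil]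
  | cons x rest ih =>
    rw [PySem.List.enumerate_cons]
    simp only [List.any_cons, Bool.or_eq_true, ih]
    constructor
    · rintro (h | ⟨k, hk, hf⟩)
      · exact ⟨0, by simp, by simpa using h⟩
      · refine ⟨k + 1, by simpa using hk, ?_⟩
        push_cast
        rw [show s + ((k : Int) + 1) = (s + 1) + k by ring, List.getD_cons_succ]
        exact hf
    · rintro ⟨k, hk, hf⟩
      cases k with
      | zero => exact Or.inl (by simpa using hf)
      | succ k =>
        refine Or.inr ⟨k, by simpa using hk, ?_⟩
        push_cast at hf
        rw [show s + ((k : Int) + 1) = (s + 1) + k by ring, List.getD_cons_succ] at hf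
        exact hf

lemma upperFlag_iff (mat : List (List Int)) :
    ((pvScan (mat.length : Int) (PySem.List.enumerate mat 0) false false).1 = true)
      ↔ Uprop mat := by
  rw [pvScan_eq]
  simp only [Bool.false_or]
  rw [enumerate_any_iff ([] : List Int)]
  unfold Uprop
  constructor
  · rintro ⟨i, hi, h⟩
    rw [enumerate_any_iff (0 : Int)] at h
    obtain ⟨j, hj, hf⟩ := h
    rw [PySem.List.slice_to_natCast] at hj hf
    simp only [List.length_take, lt_min_iff] at hj
    simp only [Bool.and_eq_true, decide_eq_true_eq, zero_add] at hf
    refine ⟨i, j, hi, hj.1, by exact_mod_cast hf.2, ?_⟩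
    have := hf.1
    rwa [List.getD_eq_getElem?_getD, List.getElem?_take, if_pos hj.1,
         ← List.getD_eq_getElem?_getD] at this
  · rintro ⟨i, j, hi, hj, hij, hx⟩
    have hjrow : j < (mat.getD i []).length := by
      by_contra hc
      exact hx (List.getD_eq_default _ _ (by omega))
    refine ⟨i, hi, ?_⟩
    rw [enumerate_any_iff (0 : Int), PySem.List.slice_to_natCast]
    refine ⟨j, by simp only [List.length_take, lt_min_iff]; omega, ?_⟩
    simp only [Bool.and_eq_true, decide_eq_true_eq, zero_add]
    refine ⟨?_, by exact_mod_cast hij⟩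
    rwa [List.getD_eq_getElem?_getD, List.getElem?_take, if_pos hj,
         ← List.getD_eq_getElem?_getD]

lemma lowerFlag_iff (mat : List (List Int)) :
    ((pvScan (mat.length : Int) (PySem.List.enumerate mat 0) false false).2 = true)
      ↔ Lprop mat := by
  rw [pvScan_eq]
  simp only [Bool.false_or]
  rw [enumerate_any_iff ([] : List Int)]
  unfold Lprop
  constructor
  · rintro ⟨i, hi, h⟩
    rw [enumerate_any_iff (0 : Int)] at h
    obtain ⟨j, hj, hf⟩ := h
    rw [PySem.List.slice_to_natCast] at hj hf
    simp only [List.length_take, lt_min_iff] at hj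
    simp only [Bool.and_eq_true, decide_eq_true_eq, zero_add] at hf
    refine ⟨i, j, hi, by exact_mod_cast hf.2, ?_⟩
    have := hf.1
    rwa [List.getD_eq_getElem?_getD, List.getElem?_take, if_pos hj.1,
         ← List.getD_eq_getElem?_getD] at this
  · rintro ⟨i, j, hi, hij, hx⟩
    have hjrow : j < (mat.getD i []).length := by
      by_contra hc
      exact hx (List.getD_eq_default _ _ (by omega))
    refine ⟨i, hi, ?_⟩
    rw [enumerate_any_iff (0 : Int), PySem.List.slice_to_natCast]
    refine ⟨j, by simp only [List.length_take, lt_min_iff]; omega, ?_⟩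
    simp only [Bool.and_eq_true, decide_eq_true_eq, zero_add]
    refine ⟨?_, by exact_mod_cast hij⟩
    rwa [List.getD_eq_getElem?_getD, List.getElem?_take, if_pos (show j < mat.length by omega),
         ← List.getD_eq_getElem?_getD]

-- ===== VERDICT (by name: the statement is the Claim_ definition above) =====
theorem isUpperorLower_spec : Claim_equal_isUpperorLower := by
  intro mat _ _
  unfold Spec_isUpperorLower isUpperorLower isUpperorLower_alt
  have hu := upperFlag_iff mat
  have hl := lowerFlag_iff mat
  have hU := phaseUp_iff mat
  have hL := phaseLo_iff mat
  by_cases hUp : Uprop mat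
  · have h1 : pvOuterUp mat (mat.length : Int) (PySem.List.pyRange 0 (mat.length : Int) 1) true = false := by
      cases h : pvOuterUp mat (mat.length : Int) (PySem.List.pyRange 0 (mat.length : Int) 1) true
      · rfl
      · exact absurd hUp (hU.mp h)
    have h2 : (pvScan (mat.length : Int) (PySem.List.enumerate mat 0) false false).1 = true := hu.mpr hUp
    by_cases hLo : Lprop mat
    · have h3 : pvOuterLo mat (mat.length : Int) (PySem.List.pyRange 1 (mat.length : Int) 1) true = false := by
        cases h : pvOuterLo mat (mat.length : Int) (PySem.List.pyRange 1 (mat.length : Int) 1) true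
        · rfl
        · exact absurd hLo (hL.mp h)
      have h4 : (pvScan (mat.length : Int) (PySem.List.enumerate mat 0) false false).2 = true := hl.mpr hLo
      simp [h1, h2, h3, h4]
    · have h3 : pvOuterLo mat (mat.length : Int) (PySem.List.pyRange 1 (mat.length : Int) 1) true = true := hL.mpr hLo
      have h4 : (pvScan (mat.length : Int) (PySem.List.enumerate mat 0) false false).2 = false := by
        cases h : (pvScan (mat.length : Int) (PySem.List.enumerate mat 0) false false).2
        · rfl
        · exact absurd (hl.mp h) hLo
      simp [h1, h2, h3, h4]
  · have h1 : pvOuterUp mat (mat.length : Int) (PySem.List.pyRange 0 (mat.length : Int) 1) true = true := hU.mpr hUp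
    have h2 : (pvScan (mat.length : Int) (PySem.List.enumerate mat 0) false false).1 = false := by
      cases h : (pvScan (mat.length : Int) (PySem.List.enumerate mat 0) false false).1
      · rfl
      · exact absurd (hu.mp h) hUp
    simp [h1, h2]
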